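-- pv_equiv track=rewrite | github.com/felipedias1/restaurant-orders | src/analyze_log.py | joao_orders
-- ===== SOURCE A (Python) =====
-- def joao_orders(data):
--     menu = set(item["pedido"] for item in data)
--     customer_orders = []
--     for order in data:
--         if order["nome"] == "joao":
--             customer_orders.append(order["pedido"])
--     new_dict = set(customer_orders)
--     return menu - new_dict
-- ===== SOURCE B (Python) =====
-- def joao_orders(data):
--     index = {}
--     for order in data:
--         index.setdefault(order["pedido"], set()).add(order["nome"])
--     return {pedido for pedido, names in index.items() if "joao" not in names}
-- ===== Notes on version B (the rewrite author's own statement) =====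
-- stated objective: alternative
-- what changed: Replaces the two-separate-sets-and-subtract strategy with a single grouping dict mapping each pedido to the set of customer names seen for it, then selects the pedidos whose name-set lacks 'joao'.
import Mathlib
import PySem

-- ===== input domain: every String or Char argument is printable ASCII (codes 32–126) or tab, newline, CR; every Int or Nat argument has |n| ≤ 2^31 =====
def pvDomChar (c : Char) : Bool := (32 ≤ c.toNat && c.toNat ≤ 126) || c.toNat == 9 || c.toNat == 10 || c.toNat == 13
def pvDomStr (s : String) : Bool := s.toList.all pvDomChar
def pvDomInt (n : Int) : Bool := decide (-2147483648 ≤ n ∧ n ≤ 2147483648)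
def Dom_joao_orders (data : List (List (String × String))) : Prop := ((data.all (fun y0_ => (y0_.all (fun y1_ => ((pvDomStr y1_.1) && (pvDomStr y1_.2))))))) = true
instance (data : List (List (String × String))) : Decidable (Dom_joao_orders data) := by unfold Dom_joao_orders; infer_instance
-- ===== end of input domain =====

-- B groups orders into one dict pedido → set of names instead of A's two sets and a subtraction; same cost, different structure.
-- order["k"] on an association-list order: first match, total under Pre_ (key present)
def pvLookup (o : List (String × String)) (k : String) : String :=
  (PySem.Dict.mk o).getD k ""

-- ===== PORT A =====
def joao_orders (data : List (List (String × String))) : List String :=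
  let menu := PySem.Set.ofList (data.map (fun item => pvLookup item "pedido"))
  let customer_orders := data.foldl
    (fun acc order => if pvLookup order "nome" == "joao" then acc ++ [pvLookup order "pedido"] else acc) []
  let new_dict := PySem.Set.ofList customer_orders
  PySem.Set.diff menu new_dict

-- ===== PORT B =====
def joao_orders_alt (data : List (List (String × String))) : List String :=
  let index := data.foldl
    (fun d order =>
      PySem.Dict.modify d (pvLookup order "pedido") PySem.Set.empty
        (fun s => PySem.Set.add s (pvLookup order "nome")))
    PySem.Dict.empty
  ((PySem.Dict.items index).filter (fun p => !(PySem.Set.contains p.2 "joao"))).map (·.1)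

-- ===== PRECONDITION & SPEC =====
-- Pre_: every order dict carries both keys "pedido" and "nome"; otherwise the Python A raises KeyError.
def Pre_joao_orders (data : List (List (String × String))) : Prop :=
  (data.all (fun o => o.any (fun p => p.1 == "pedido") && o.any (fun p => p.1 == "nome"))) = true
instance (data : List (List (String × String))) : Decidable (Pre_joao_orders data) := by unfold Pre_joao_orders; infer_instance
def pvWitness_joao_orders : (List (List (String × String))) := [[("pedido", "pizza"), ("nome", "joao")], [("pedido", "suco"), ("nome", "ana")]]

def Spec_joao_orders (data : List (List (String × String))) (out : List String) : Prop := out = joao_orders_alt data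
instance (data : List (List (String × String))) (out : List String) : Decidable (Spec_joao_orders data out) := by unfold Spec_joao_orders; infer_instance

-- ===== CLAIM (what is proved, stated in full; the proofs are below) =====
def Claim_equal_joao_orders : Prop := ∀ (data : List (List (String × String))), Dom_joao_orders data → Pre_joao_orders data → Spec_joao_orders data (joao_orders data)

-- ===== LEMMAS AND PROOFS =====

-- "joao" sits in the grouped name-set of k iff some order in l has pedido k and nome "joao"
theorem pv_mem_group (l : List (List (String × String))) (d : PySem.Dict String (PySem.Set String)) (k : String) :
    ("joao" ∈ PySem.Dict.getD
        (l.foldl (fun d order =>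
          PySem.Dict.modify d (pvLookup order "pedido") PySem.Set.empty
            (fun s => PySem.Set.add s (pvLookup order "nome"))) d)
        k PySem.Set.empty)
    ↔ ("joao" ∈ PySem.Dict.getD d k PySem.Set.empty ∨
        ∃ o ∈ l, pvLookup o "pedido" = k ∧ pvLookup o "nome" = "joao") := by
  induction l generalizing d with
  | nil => simp
  | cons o l ih =>
    simp only [List.foldl_cons, ih, PySem.Dict.getD_modify, List.mem_cons]
    by_cases h : k = pvLookup o "pedido" <;> by_cases h2 : pvLookup o "nome" = "joao" <;>
      simp [h, h2, eq_comm] <;> aesop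

theorem pv_filter_map_fst {α β : Type} (l : List (α × β)) (P : β → Bool) (Q : α → Bool)
    (h : ∀ p ∈ l, P p.2 = Q p.1) :
    (l.filter (fun p => P p.2)).map (·.1) = (l.map (·.1)).filter Q := by
  induction l with
  | nil => rfl
  | cons p l ih =>
    have hp := h p (List.mem_cons_self ..)
    simp only [List.filter_cons, List.map_cons, hp]
    cases hq : Q p.1 <;>
      simp [ih (fun q hq => h q (List.mem_cons_of_mem _ hq))]

-- ===== VERDICT (by name: the statement is the Claim_ definition above) =====
theorem joao_orders_spec : Claim_equal_joao_orders := by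
  intro data _ _
  unfold Spec_joao_orders joao_orders joao_orders_alt
  simp only []
  -- A side: customer loop = filter+map; diff = filter by non-membership
  rw [PySem.List.foldl_append_if]
  set ped := fun o : List (String × String) => pvLookup o "pedido" with hped
  set index := data.foldl
    (fun d order =>
      PySem.Dict.modify d (pvLookup order "pedido") PySem.Set.empty
        (fun s => PySem.Set.add s (pvLookup order "nome"))) PySem.Dict.empty with hidx
  have hnk : (PySem.Dict.keys index).Nodup :=
    PySem.Dict.nodup_keys_foldl_modify_key data (fun o => pvLookup o "pedido") PySem.Set.empty
      (fun _ order => fun s => PySem.Set.add s (pvLookup order "nome")) PySem.Dict.empty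
      PySem.Dict.nodup_keys_empty
  have hkeys : PySem.Dict.keys index = PySem.Set.ofList (data.map ped) := by
    rw [hidx, PySem.Dict.keys_foldl_modify_key, PySem.Dict.keys_empty, PySem.Set.update_nil_left]
  simp only [List.nil_append]
  rw [pv_filter_map_fst (PySem.Dict.items index) (fun v => !(PySem.Set.contains v "joao"))
      (fun k => !(PySem.Set.contains (PySem.Set.ofList ((data.filter (fun o => pvLookup o "nome" == "joao")).map ped)) k))
      ?_]
  · rw [show List.map (fun x => x.1) index.items = index.keys from rfl, hkeys]
    rfl
  · intro p hp
    obtain ⟨k, v⟩ := p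
    have hv := PySem.Dict.getD_of_mem_items (d0 := PySem.Set.empty) (d := index) (k := k) (v := v) hp hnk
    have hc : PySem.Set.contains v "joao"
        = PySem.Set.contains (PySem.Set.ofList ((data.filter (fun o => pvLookup o "nome" == "joao")).map ped)) k := by
      rw [Bool.eq_iff_iff]
      simp only [PySem.Set.contains_iff, ← hv]
      rw [pv_mem_group data PySem.Dict.empty k]
      simp [PySem.Set.mem_ofList, List.mem_map, List.mem_filter, hped]
      tauto
    simpa using hc
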